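-- pv_equiv track=rewrite | github.com/jkc-mycode/Coding_Study | 프로그래머스/2/12913. 땅따먹기/땅따먹기.py | solution
-- ===== SOURCE A (Python) =====
-- def solution(land):
--     a,b,c,d = land[0]
--
--     for i in land[1:]:
--         e,f,g,h = a,b,c,d
--         a,b,c,d = i
--
--         a += max(f,g,h)
--         b += max(e,g,h)
--         c += max(e,f,h)
--         d += max(e,f,g)
--
--     return max(a, b, c, d)
-- ===== SOURCE B (Python) =====
-- def solution(land):
--     e, f, g, h = land[0]
--     dp = [e, f, g, h]
--     for row in land[1:]:
--         a, b, c, d = row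
--         idx, max1, max2 = 0, dp[0], None
--         for j, v in enumerate(dp[1:], 1):
--             if v > max1:
--                 idx, max1, max2 = j, v, max1
--             elif max2 is None or v > max2:
--                 max2 = v
--         dp = [x + (max2 if j == idx else max1) for j, x in enumerate((a, b, c, d))]
--     return max(dp)
-- ===== Notes on version B (the rewrite author's own statement) =====
-- stated objective: alternative
-- what changed: Replaces the four hand-unrolled per-column max(.,.,.) updates over tuple variables with a generic top-two scan of the previous dp row (argmax, max, second max) and one row rebuild dp[j] = row[j] + (max2 if j == argmax else max1).
import Mathlib
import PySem

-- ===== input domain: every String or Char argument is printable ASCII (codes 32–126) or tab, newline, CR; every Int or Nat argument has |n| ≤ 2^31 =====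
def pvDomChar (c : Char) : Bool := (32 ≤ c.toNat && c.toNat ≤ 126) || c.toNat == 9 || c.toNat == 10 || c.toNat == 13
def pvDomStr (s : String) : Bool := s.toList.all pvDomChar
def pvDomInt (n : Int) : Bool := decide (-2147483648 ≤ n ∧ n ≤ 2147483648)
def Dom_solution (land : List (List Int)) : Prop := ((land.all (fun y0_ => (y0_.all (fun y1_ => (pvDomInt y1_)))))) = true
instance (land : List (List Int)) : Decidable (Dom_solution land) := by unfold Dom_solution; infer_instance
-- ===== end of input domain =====

-- B replaces A's four hand-unrolled per-column updates with a top-two (argmax/max/second-max)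
-- scan of the previous dp row and a single rebuild; same cost, different decomposition.

-- B replaces A's four hand-unrolled per-column updates with a top-two (argmax/max/second-max)
-- scan of the previous dp row and a single rebuild; same cost, different decomposition.

-- ===== PORT A =====
-- loop body of A: unpack the row, add max of the other three columns to each
def stepA (s : Int × Int × Int × Int) (i : List Int) : Int × Int × Int × Int :=
  match i with
  | [] => s
  | a :: t1 =>
    match t1 with
    | [] => s
    | b :: t2 =>
      match t2 with
      | [] => s
      | c :: t3 =>
        match t3 with
        | [] => s
        | d :: t4 =>
          match t4 with
          | _ :: _ => s
          | [] =>
            let (e, f, g, h) := s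
            (a + max f (max g h), b + max e (max g h), c + max e (max f h), d + max e (max f g))

def solution (land : List (List Int)) : Int :=
  match land with
  | [] => 0
  | first :: rest =>
    match first with
    | [] => 0
    | a0 :: t1 =>
      match t1 with
      | [] => 0
      | b0 :: t2 =>
        match t2 with
        | [] => 0
        | c0 :: t3 =>
          match t3 with
          | [] => 0
          | d0 :: t4 =>
            match t4 with
            | _ :: _ => 0
            | [] =>
              let s := rest.foldl stepA (a0, b0, c0, d0)
              max s.1 (max s.2.1 (max s.2.2.1 s.2.2.2))

-- ===== PORT B =====
-- one step of Source B's loop body: unpack the row, top-two scan of dp, then rebuild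
def altStep (dp row : List Int) : List Int :=
  match row with
  | [] => dp
  | a :: u1 =>
    match u1 with
    | [] => dp
    | b :: u2 =>
      match u2 with
      | [] => dp
      | c :: u3 =>
        match u3 with
        | [] => dp
        | d :: u4 =>
          match u4 with
          | _ :: _ => dp
          | [] =>
            match dp with
            | [] => dp
            | v0 :: dptail =>
              let st := (PySem.List.enumerate dptail 1).foldl
                (fun (s : Int × Int × Option Int) (jv : Int × Int) =>
                  if jv.2 > s.2.1 then (jv.1, jv.2, some s.2.1)
                  else match s.2.2 with
                    | none => (s.1, s.2.1, some jv.2)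
                    | some m2 => if jv.2 > m2 then (s.1, s.2.1, some jv.2) else s)
                (0, v0, none)
              (PySem.List.enumerate [a, b, c, d] 0).map
                (fun jx => jx.2 + (if jx.1 == st.1 then st.2.2.getD st.2.1 else st.2.1))

def solution_alt (land : List (List Int)) : Int :=
  match land with
  | [] => 0
  | first :: rest =>
    match first with
    | [] => 0
    | e :: w1 =>
      match w1 with
      | [] => 0
      | f :: w2 =>
        match w2 with
        | [] => 0
        | g :: w3 =>
          match w3 with
          | [] => 0
          | h :: w4 =>
            match w4 with
            | _ :: _ => 0
            | [] =>
              let dp := rest.foldl altStep [e, f, g, h]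
              (PySem.List.max? dp (fun x => x)).getD 0

-- ===== PRECONDITION & SPEC =====
-- A unpacks every row (and land[0]) into exactly four variables and raises ValueError/IndexError
-- otherwise: Pre_ admits exactly non-empty lists of rows of length 4.
def Pre_solution (land : List (List Int)) : Prop :=
  land ≠ [] ∧ ∀ row ∈ land, row.length = 4
instance (land : List (List Int)) : Decidable (Pre_solution land) := by
  unfold Pre_solution; infer_instance
def pvWitness_solution : List (List Int) := [[1, 2, 3, 5], [5, 6, 7, 8], [4, 3, 2, 1]]

def Spec_solution (land : List (List Int)) (out : Int) : Prop := out = solution_alt land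
instance (land : List (List Int)) (out : Int) : Decidable (Spec_solution land out) := by
  unfold Spec_solution; infer_instance

-- ===== CLAIM (what is proved, stated in full; the proofs are below) =====
def Claim_equal_solution : Prop :=
  ∀ (land : List (List Int)), Dom_solution land → Pre_solution land →
    Spec_solution land (solution land)

-- ===== LEMMAS AND PROOFS =====

-- one loop step agrees: top-two rebuild on [e,f,g,h] equals A's four unrolled maxes
set_option maxHeartbeats 1000000 in
lemma altStep_step (e f g h a b c d : Int) :
    altStep [e, f, g, h] [a, b, c, d] =
      [a + max f (max g h), b + max e (max g h), c + max e (max f h), d + max e (max f g)] := by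
  simp only [altStep, PySem.List.enumerate_cons, PySem.List.enumerate_nil, List.foldl, List.map]
  by_cases c1 : f > e
  · simp only [c1, if_true]
    by_cases c2 : g > f
    · simp only [c2, if_true]
      by_cases c3 : h > g
      · simp only [c3, if_true]; simp ; omega
      · simp only [c3, if_false]
        by_cases c4 : h > f
        · simp only [c4, if_true]; simp ; omega
        · simp only [c4, if_false]; simp ; omega
    · simp only [c2, if_false]
      by_cases c3 : g > e
      · simp only [c3, if_true]
        by_cases c4 : h > f
        · simp only [c4, if_true]; simp ; omega
        · simp only [c4, if_false]
          by_cases c5 : h > g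
          · simp only [c5, if_true]; simp ; omega
          · simp only [c5, if_false]; simp ; omega
      · simp only [c3, if_false]
        by_cases c4 : h > f
        · simp only [c4, if_true]; simp ; omega
        · simp only [c4, if_false]
          by_cases c5 : h > e
          · simp only [c5, if_true]; simp ; omega
          · simp only [c5, if_false]; simp ; omega
  · simp only [c1, if_false]
    by_cases c2 : g > e
    · simp only [c2, if_true]
      by_cases c3 : h > g
      · simp only [c3, if_true]; simp; omega
      · simp only [c3, if_false]
        by_cases c4 : h > e
        · simp only [c4, if_true]; simp; omega
        · simp only [c4, if_false]; simp; omega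
    · simp only [c2, if_false]
      by_cases c3 : g > f
      · simp only [c3, if_true]
        by_cases c4 : h > e
        · simp only [c4, if_true]; simp; omega
        · simp only [c4, if_false]
          by_cases c5 : h > g
          · simp only [c5, if_true]; simp; omega
          · simp only [c5, if_false]; simp; omega
      · simp only [c3, if_false]
        by_cases c4 : h > e
        · simp only [c4, if_true]; simp; omega
        · simp only [c4, if_false]
          by_cases c5 : h > f
          · simp only [c5, if_true]; simp; omega
          · simp only [c5, if_false]; simp; omega

lemma fold_inv (rest : List (List Int)) (hrest : ∀ row ∈ rest, row.length = 4)
    (e f g h : Int) :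
    rest.foldl altStep [e, f, g, h] =
      (match rest.foldl stepA (e, f, g, h) with
      | (a, b, c, d) => [a, b, c, d]) := by
  induction rest generalizing e f g h with
  | nil => rfl
  | cons r t ih =>
    have hr : r.length = 4 := hrest r (by simp)
    match r, hr with
    | [a, b, c, d], _ =>
      simp only [List.foldl, altStep_step]
      exact ih (fun row hm => hrest row (by simp [hm])) _ _ _ _

lemma max4_eq (a b c d : Int) :
    (PySem.List.max? [a, b, c, d] (fun x => x)).getD 0 = max a (max b (max c d)) := by
  rw [PySem.List.max?_id_cons]
  simp only [List.foldl, Option.getD_some]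
  omega

theorem solution_spec_aux (land : List (List Int)) (hp : Pre_solution land) :
    solution land = solution_alt land := by
  obtain ⟨hne, hlen⟩ := hp
  match land, hne with
  | first :: rest, _ =>
    have h0 : first.length = 4 := hlen first (by simp)
    match first, h0 with
    | [a0, b0, c0, d0], _ =>
      have hrest : ∀ row ∈ rest, row.length = 4 := fun row hm => hlen row (by simp [hm])
      simp only [solution, solution_alt]
      rw [fold_inv rest hrest a0 b0 c0 d0]
      rcases hfold : rest.foldl stepA (a0, b0, c0, d0) with ⟨a, b, c, d⟩
      simp [max4_eq]

-- ===== VERDICT (by name: the statement is the Claim_ definition above) =====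
theorem solution_spec : Claim_equal_solution := by
  intro land _ hp
  exact solution_spec_aux land hp
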